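-- pv_equiv track=rewrite | github.com/ezedinff/a2sv | 49-progress/c.pattern.py | solve
-- ===== SOURCE A (Python) =====
-- def solve(n, patterns):
--     ans = []
--     for i in range(len(patterns[0])):
--         chars = set()
--         for pattern in patterns:
--             if pattern[i] != '?':
--                 chars.add(pattern[i])
--         if len(chars) == 1:
--             ans.append(chars.pop())
--         elif len(chars) > 1:
--             ans.append('?')
--         else:
--             ans.append('x')
--     return ''.join(ans)
-- ===== SOURCE B (Python) =====
-- def solve(n, patterns):
--     m = len(patterns[0])
--     state = [None] * m
--     for pattern in patterns:
--         for i in range(m):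
--             c = pattern[i]
--             if c == '?':
--                 continue
--             if state[i] is None:
--                 state[i] = c
--             elif state[i] != c:
--                 state[i] = '?'
--     return ''.join('x' if s is None else s for s in state)
-- ===== Notes on version B (the rewrite author's own statement) =====
-- stated objective: alternative
-- what changed: replaces A's column-major nested loop that builds a fresh set per column with a single pattern-major fold over a per-column first-seen/conflict state array, mapped to the output string at the end
import Mathlib
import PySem

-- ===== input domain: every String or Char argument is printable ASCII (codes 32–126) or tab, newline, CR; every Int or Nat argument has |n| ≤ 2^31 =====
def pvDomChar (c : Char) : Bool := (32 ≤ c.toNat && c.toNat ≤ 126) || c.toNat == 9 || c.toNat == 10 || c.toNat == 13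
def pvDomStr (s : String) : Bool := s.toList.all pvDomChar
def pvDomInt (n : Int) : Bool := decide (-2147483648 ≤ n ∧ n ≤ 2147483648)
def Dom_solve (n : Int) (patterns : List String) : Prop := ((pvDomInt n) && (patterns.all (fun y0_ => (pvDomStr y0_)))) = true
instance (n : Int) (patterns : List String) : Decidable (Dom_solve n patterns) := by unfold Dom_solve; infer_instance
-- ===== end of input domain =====

-- B replaces the per-column set accumulation with a single pattern-major fold over a
-- per-column first-seen/conflict state array (alternative decomposition, same cost).

-- ===== PORT A =====
-- literal port of Source A; chars.pop() on a one-element set is its unique element (headD)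
def solve (n : Int) (patterns : List String) : String :=
  let m : Int := PySem.Str.len (PySem.List.pyGetD patterns 0 "")
  let ans : List Char := (PySem.List.pyRange 0 m 1).foldl (fun ans i =>
    let chars : PySem.Set Char := patterns.foldl (fun chars p =>
      if PySem.List.pyGetD p.toList i ' ' ≠ '?'
      then PySem.Set.add chars (PySem.List.pyGetD p.toList i ' ')
      else chars) PySem.Set.empty
    if chars.length = 1 then ans ++ [chars.headD 'x']
    else if 1 < chars.length then ans ++ ['?']
    else ans ++ ['x']) []
  String.mk ans

-- ===== PORT B =====
def solve_alt (n : Int) (patterns : List String) : String :=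
  let m : Int := PySem.Str.len (PySem.List.pyGetD patterns 0 "")
  let state : List (Option Char) :=
    patterns.foldl (fun st p =>
      (PySem.List.pyRange 0 m 1).foldl (fun st i =>
        let c := PySem.List.pyGetD p.toList i ' '
        if c = '?' then st
        else
          match PySem.List.pyGetD st i none with
          | none => PySem.List.pySetD st i (some c)
          | some s => if s ≠ c then PySem.List.pySetD st i (some '?') else st) st)
      (List.replicate m.toNat none)
  String.mk (state.map (fun s => match s with | none => 'x' | some c => c))

-- ===== PRECONDITION & SPEC =====
-- Pre_ excludes exactly the inputs where Python A raises: an empty pattern list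
-- (patterns[0] is an IndexError) and lists in which some pattern is shorter than
-- the first one (pattern[i] is an IndexError).
def Pre_solve (n : Int) (patterns : List String) : Prop :=
  patterns ≠ [] ∧ ∀ p ∈ patterns, (patterns.headD "").toList.length ≤ p.toList.length
instance (n : Int) (patterns : List String) : Decidable (Pre_solve n patterns) := by
  unfold Pre_solve; infer_instance
def pvWitness_solve : Int × List String := (3, ["a?c", "abc", "x?cz"])

def Spec_solve (n : Int) (patterns : List String) (out : String) : Prop := out = solve_alt n patterns
instance (n : Int) (patterns : List String) (out : String) : Decidable (Spec_solve n patterns out) := by unfold Spec_solve; infer_instance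

-- ===== CLAIM (what is proved, stated in full; the proofs are below) =====
def Claim_equal_solve : Prop := ∀ (n : Int) (patterns : List String), Dom_solve n patterns → Pre_solve n patterns → Spec_solve n patterns (solve n patterns)

-- ===== LEMMAS AND PROOFS =====

-- per-column step of B
def cellStep (p : List Char) (k : Nat) (s : Option Char) : Option Char :=
  let c := p.getD k ' '
  if c = '?' then s
  else
    match s with
    | none => some c
    | some x => if x ≠ c then some '?' else s

-- per-column set accumulation of A
def colSet (patterns : List String) (k : Nat) : List Char :=
  patterns.foldl (fun chars p =>
    if p.toList.getD k ' ' ≠ '?' then PySem.Set.add chars (p.toList.getD k ' ') else chars)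
    PySem.Set.empty

def colState (patterns : List String) (k : Nat) : Option Char :=
  patterns.foldl (fun s p => cellStep p.toList k s) none

-- relation between A's set and B's per-column state
def SRel (s : List Char) (st : Option Char) : Prop :=
  (s = [] ∧ st = none) ∨ (∃ c, c ≠ '?' ∧ s = [c] ∧ st = some c) ∨ (2 ≤ s.length ∧ st = some '?')

def optStep (c0 : Char) (st : Option Char) : Option Char :=
  if c0 = '?' then st
  else match st with | none => some c0 | some x => if x ≠ c0 then some '?' else st

theorem cellStep_eq (p : List Char) (k : Nat) (st : Option Char) :
    cellStep p k st = optStep (p.getD k ' ') st := rfl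

theorem rel_step' (s : List Char) (st : Option Char) (c0 : Char) (h : SRel s st) :
    SRel (if c0 ≠ '?' then PySem.Set.add s c0 else s) (optStep c0 st) := by
  unfold SRel at h ⊢
  unfold optStep
  by_cases hc : c0 = '?'
  · simpa [hc] using h
  · rw [if_pos hc, if_neg hc]
    rcases h with ⟨hs, hst⟩ | ⟨c, hcq, hs, hst⟩ | ⟨hs, hst⟩
    · subst hs; subst hst
      exact Or.inr (Or.inl ⟨c0, hc, by simp [PySem.Set.add], rfl⟩)
    · subst hs; subst hst
      by_cases he : c0 = c
      · subst he
        exact Or.inr (Or.inl ⟨c0, hcq, by simp [PySem.Set.add], by simp⟩)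
      · refine Or.inr (Or.inr ⟨?_, by simp [Ne.symm he]⟩)
        simp [PySem.Set.add, he]
    · subst hst
      refine Or.inr (Or.inr ⟨?_, by simp [Ne.symm hc]⟩)
      have hle : s.length ≤ (PySem.Set.add s c0).length := by
        simp only [PySem.Set.add]; split_ifs <;> simp
      omega

theorem rel_fold_aux (k : Nat) : ∀ (ps : List String) (s : List Char) (st : Option Char),
    SRel s st →
    SRel (ps.foldl (fun chars p =>
            if p.toList.getD k ' ' ≠ '?' then PySem.Set.add chars (p.toList.getD k ' ') else chars) s)
         (ps.foldl (fun s p => cellStep p.toList k s) st)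
  | [], _, _, h => h
  | p :: ps, s, st, h => by
      simp only [List.foldl_cons]
      exact rel_fold_aux k ps _ _ (by rw [cellStep_eq]; exact rel_step' s st (p.toList.getD k ' ') h)

theorem rel_fold (patterns : List String) (k : Nat) :
    SRel (colSet patterns k) (colState patterns k) := by
  unfold colSet colState
  exact rel_fold_aux k patterns _ _ (Or.inl ⟨rfl, rfl⟩)

-- the inner (column) fold of B as a pointwise map
theorem inner_fold (p : List Char) (f : Nat → Option Char) :
    ∀ (n a : Nat) (pre : List (Option Char)), pre.length = a →
    (List.range' a n).foldl (fun st k =>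
      if p.getD k ' ' = '?' then st
      else
        match st.getD k none with
        | none => st.set k (some (p.getD k ' '))
        | some s => if s ≠ p.getD k ' ' then st.set k (some '?') else st)
      (pre ++ (List.range' a n).map f)
    = pre ++ (List.range' a n).map (fun k => cellStep p k (f k))
  | 0, a, pre, h => by simp
  | n+1, a, pre, h => by
      have hget : (pre ++ f a :: (List.range' (a+1) n).map f).getD a none = f a := by
        simp [List.getD_eq_getElem?_getD, h]
      have hset : ∀ v, (pre ++ f a :: (List.range' (a+1) n).map f).set a v
          = pre ++ v :: (List.range' (a+1) n).map f := by
        intro v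
        rw [List.set_append_right _ _ (by omega)]
        simp [h]
      simp only [List.range'_succ, List.map_cons, List.foldl_cons]
      have hstep : (if p.getD a ' ' = '?' then (pre ++ f a :: (List.range' (a+1) n).map f)
          else match (pre ++ f a :: (List.range' (a+1) n).map f).getD a none with
          | none => (pre ++ f a :: (List.range' (a+1) n).map f).set a (some (p.getD a ' '))
          | some s => if s ≠ p.getD a ' '
                      then (pre ++ f a :: (List.range' (a+1) n).map f).set a (some '?')
                      else (pre ++ f a :: (List.range' (a+1) n).map f))
          = pre ++ cellStep p a (f a) :: (List.range' (a+1) n).map f := by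
        rw [cellStep_eq]; unfold optStep
        rw [hget]
        by_cases hc : p.getD a ' ' = '?'
        · rw [if_pos hc, if_pos hc]
        · rw [if_neg hc, if_neg hc]
          cases hfa : f a with
          | none => dsimp only; rw [hfa] at hset; exact hset _
          | some x =>
            dsimp only
            rw [hfa] at hset
            by_cases hx : x = p.getD a ' '
            · rw [if_neg (by simp [hx]), if_neg (by simp [hx])]
            · rw [if_pos hx, if_pos hx]
              exact hset _
      rw [hstep]
      have ih := inner_fold p f n (a+1) (pre ++ [cellStep p a (f a)]) (by simp [h])
      simpa using ih

theorem state_fold_aux (M : Nat) :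
    ∀ (ps : List String) (f : Nat → Option Char),
    ps.foldl (fun st p =>
      (List.range' 0 M).foldl (fun st k =>
        if p.toList.getD k ' ' = '?' then st
        else
          match st.getD k none with
          | none => st.set k (some (p.toList.getD k ' '))
          | some s => if s ≠ p.toList.getD k ' ' then st.set k (some '?') else st) st)
      ((List.range' 0 M).map f)
    = (List.range' 0 M).map (fun k => ps.foldl (fun s p => cellStep p.toList k s) (f k))
  | [], f => rfl
  | p :: ps, f => by
      simp only [List.foldl_cons]
      have hin := inner_fold p.toList f M 0 [] rfl
      simp only [List.nil_append] at hin
      rw [hin]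
      exact state_fold_aux M ps (fun k => cellStep p.toList k (f k))

theorem state_fold (patterns : List String) (M : Nat) :
    patterns.foldl (fun st p =>
      (List.range M).foldl (fun st k =>
        if p.toList.getD k ' ' = '?' then st
        else
          match st.getD k none with
          | none => st.set k (some (p.toList.getD k ' '))
          | some s => if s ≠ p.toList.getD k ' ' then st.set k (some '?') else st) st)
      (List.replicate M none)
    = (List.range M).map (fun k => colState patterns k) := by
  have hrepl : List.replicate M (none : Option Char) = (List.range' 0 M).map (fun _ => none) := by
    simp [List.map_const']
  rw [List.range_eq_range', hrepl, state_fold_aux M patterns (fun _ => none)]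
  rfl

theorem col_eq (patterns : List String) (k : Nat) :
    (if (colSet patterns k).length = 1 then (colSet patterns k).headD 'x'
     else if 1 < (colSet patterns k).length then '?' else 'x')
    = (match colState patterns k with | none => 'x' | some c => c) := by
  have h := rel_fold patterns k
  unfold SRel at h
  rcases h with ⟨hs, hst⟩ | ⟨c, hcq, hs, hst⟩ | ⟨hs, hst⟩
  · rw [hs, hst]; rfl
  · rw [hs, hst]; rfl
  · rw [hst, if_neg (by omega), if_pos (by omega)]

-- ===== VERDICT (by name: the statement is the Claim_ definition above) =====
theorem solve_spec : Claim_equal_solve := by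
  unfold Claim_equal_solve
  intro n patterns _ _
  unfold Spec_solve solve solve_alt
  simp only [PySem.Str.len_eq, PySem.List.pyRange_zero_natCast, List.foldl_map,
    PySem.List.pyGetD_natCast, PySem.List.pySetD_natCast, Int.toNat_natCast]
  generalize (PySem.List.pyGetD patterns 0 "").toList.length = M
  rw [state_fold patterns M, List.map_map]
  have hbody : (fun (x : List Char) (y : Nat) =>
      if (patterns.foldl (fun chars p => if p.toList.getD y ' ' ≠ '?' then PySem.Set.add chars (p.toList.getD y ' ') else chars) PySem.Set.empty).length = 1
      then x ++ [(patterns.foldl (fun chars p => if p.toList.getD y ' ' ≠ '?' then PySem.Set.add chars (p.toList.getD y ' ') else chars) PySem.Set.empty).headD 'x']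
      else if 1 < (patterns.foldl (fun chars p => if p.toList.getD y ' ' ≠ '?' then PySem.Set.add chars (p.toList.getD y ' ') else chars) PySem.Set.empty).length
      then x ++ ['?'] else x ++ ['x'])
    = fun x y => x ++ [if (colSet patterns y).length = 1 then (colSet patterns y).headD 'x'
      else if 1 < (colSet patterns y).length then '?' else 'x'] := by
    funext x y; unfold colSet; split_ifs <;> rfl
  rw [hbody, PySem.List.foldl_append_singleton_eq_map, List.nil_append]
  exact congrArg String.mk (List.map_congr_left (fun k _ => col_eq patterns k))
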